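-- pv_equiv track=rewrite | github.com/MarcPer/netsnake | clients/openai/snake_gym/snake_gym/envs/snake_env.py | tail_coords
-- ===== SOURCE A (Python) =====
-- def tail_coords(head_coords, tail_string):
--     out = []
--     curr = head_coords
--     for t in tail_string:
--         if t == 'r': curr = (curr[0] + 1, curr[1])
--         elif t == 'l': curr = (curr[0] - 1, curr[1])
--         elif t == 'u': curr = (curr[0], curr[1] - 1)
--         else: curr = (curr[0], curr[1] + 1)
--
--         out.append(curr)
--     return out
-- ===== SOURCE B (Python) =====
-- # map-then-scan: per-axis delta lists, each accumulated independently, zipped into coordinates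
-- DX = {'r': 1, 'l': -1}
--
-- def _scan(start, deltas):
--     cur = start
--     for d in deltas:
--         cur += d
--         yield cur
--
-- def tail_coords(head_coords, tail_string):
--     dxs = [DX.get(t, 0) for t in tail_string]
--     dys = [0 if t in DX else (-1 if t == 'u' else 1) for t in tail_string]
--     return list(zip(_scan(head_coords[0], dxs), _scan(head_coords[1], dys)))
-- ===== Notes on version B (the rewrite author's own statement) =====
-- stated objective: alternative
-- what changed: Replaces A's fused loop over a current-position pair with a map-then-scan decomposition: per-character x and y delta lists are built first, each axis is prefix-summed independently by a small scan generator, and the two scans are zipped into the coordinate list.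
import Mathlib
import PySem

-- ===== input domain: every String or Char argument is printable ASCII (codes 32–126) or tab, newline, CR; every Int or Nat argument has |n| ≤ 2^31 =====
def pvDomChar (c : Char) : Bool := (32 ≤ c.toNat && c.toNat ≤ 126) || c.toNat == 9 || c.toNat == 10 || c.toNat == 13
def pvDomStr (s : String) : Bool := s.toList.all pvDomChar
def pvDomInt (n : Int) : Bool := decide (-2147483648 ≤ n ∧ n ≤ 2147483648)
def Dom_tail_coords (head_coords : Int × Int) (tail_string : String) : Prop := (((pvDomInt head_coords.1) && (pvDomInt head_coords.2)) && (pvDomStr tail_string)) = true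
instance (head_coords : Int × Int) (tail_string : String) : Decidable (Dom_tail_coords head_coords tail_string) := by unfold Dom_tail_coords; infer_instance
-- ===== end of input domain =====

-- B replaces A's fused current-position loop with a map-then-scan decomposition (per-axis
-- delta lists, each prefix-summed independently, zipped); alternative, same cost.

-- ===== PORT A =====
def tail_coords (head_coords : Int × Int) (tail_string : String) : List (Int × Int) :=
  (tail_string.toList.foldl
    (fun (st : (Int × Int) × List (Int × Int)) t =>
      let curr := st.1
      let curr' :=
        if t = 'r' then (curr.1 + 1, curr.2)
        else if t = 'l' then (curr.1 - 1, curr.2)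
        else if t = 'u' then (curr.1, curr.2 - 1)
        else (curr.1, curr.2 + 1)
      (curr', st.2 ++ [curr']))
    (head_coords, [])).2

-- ===== PORT B =====
-- B's module-level dict DX = {'r': 1, 'l': -1}
def pvDX : PySem.Dict Char Int := PySem.Dict.mk [('r', 1), ('l', -1)]

-- B's _scan generator: yields the running sums (without the seed)
def pvScan (start : Int) (deltas : List Int) : List Int :=
  match deltas with
  | [] => []
  | d :: ds => (start + d) :: pvScan (start + d) ds

def tail_coords_alt (head_coords : Int × Int) (tail_string : String) : List (Int × Int) :=
  let dxs := tail_string.toList.map (fun t => pvDX.getD t 0)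
  let dys := tail_string.toList.map (fun t =>
    if pvDX.contains t then 0 else if t = 'u' then -1 else 1)
  List.zip (pvScan head_coords.1 dxs) (pvScan head_coords.2 dys)

-- ===== PRECONDITION & SPEC =====
def Spec_tail_coords (head_coords : Int × Int) (tail_string : String) (out : List (Int × Int)) : Prop := out = tail_coords_alt head_coords tail_string
instance (head_coords : Int × Int) (tail_string : String) (out : List (Int × Int)) : Decidable (Spec_tail_coords head_coords tail_string out) := by unfold Spec_tail_coords; infer_instance

-- ===== CLAIM (what is proved, stated in full; the proofs are below) =====
def Claim_equal_tail_coords : Prop := ∀ (head_coords : Int × Int) (tail_string : String), Dom_tail_coords head_coords tail_string → Spec_tail_coords head_coords tail_string (tail_coords head_coords tail_string)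

-- ===== LEMMAS AND PROOFS =====

-- A's step produces exactly head + (per-axis delta of B) for every character
theorem pv_step_eq (t : Char) (c : Int × Int) :
    (if t = 'r' then (c.1 + 1, c.2)
     else if t = 'l' then (c.1 - 1, c.2)
     else if t = 'u' then (c.1, c.2 - 1)
     else (c.1, c.2 + 1))
    = (c.1 + pvDX.getD t 0,
       c.2 + (if pvDX.contains t then 0 else if t = 'u' then -1 else 1)) := by
  by_cases hr : t = 'r'
  · subst hr; simp [pvDX, PySem.Dict.getD, PySem.Dict.get?, PySem.Dict.contains]
  · by_cases hl : t = 'l'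
    · subst hl; simp [pvDX, PySem.Dict.getD, PySem.Dict.get?, PySem.Dict.contains]; omega
    · by_cases hu : t = 'u'
      · subst hu; simp [pvDX, PySem.Dict.getD, PySem.Dict.get?, PySem.Dict.contains, hr, hl]; omega
      · simp [pvDX, PySem.Dict.getD, PySem.Dict.get?, PySem.Dict.contains, hr, hl, hu,
          Ne.symm hr, Ne.symm hl]

theorem pv_zip_scan_cons (x y dx dy : Int) (dxs dys : List Int) :
    List.zip (pvScan x (dx :: dxs)) (pvScan y (dy :: dys))
      = (x + dx, y + dy) :: List.zip (pvScan (x + dx) dxs) (pvScan (y + dy) dys) := by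
  simp [pvScan]

theorem pv_main (l : List Char) : ∀ (c : Int × Int) (acc : List (Int × Int)),
    (l.foldl
      (fun (st : (Int × Int) × List (Int × Int)) t =>
        let curr := st.1
        let curr' :=
          if t = 'r' then (curr.1 + 1, curr.2)
          else if t = 'l' then (curr.1 - 1, curr.2)
          else if t = 'u' then (curr.1, curr.2 - 1)
          else (curr.1, curr.2 + 1)
        (curr', st.2 ++ [curr'])) (c, acc)).2
    = acc ++ List.zip
        (pvScan c.1 (l.map (fun t => pvDX.getD t 0)))
        (pvScan c.2 (l.map (fun t => if pvDX.contains t then 0 else if t = 'u' then -1 else 1))) := by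
  induction l with
  | nil => intro c acc; simp [pvScan]
  | cons t ts ih =>
    intro c acc
    simp only [List.foldl_cons, List.map_cons, pv_zip_scan_cons]
    rw [pv_step_eq t c]
    rw [ih (c.1 + pvDX.getD t 0,
            c.2 + (if pvDX.contains t then 0 else if t = 'u' then -1 else 1)) _]
    simp

-- ===== VERDICT (by name: the statement is the Claim_ definition above) =====
theorem tail_coords_spec : Claim_equal_tail_coords := by
  intro h s _
  unfold Spec_tail_coords tail_coords tail_coords_alt
  simpa using pv_main s.toList h []
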